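-- pv_equiv track=rewrite | github.com/eliottcassidy2000/math | 04-computation/q009_alternating_sum.py | h_end_dp
-- ===== SOURCE A (Python) =====
-- def h_end_dp(T, verts, target):
--     n = len(verts)
--     if n == 1: return 1
--     idx = {v: k for k, v in enumerate(verts)}
--     ti = idx[target]
--     dp = [[0]*n for _ in range(1<<n)]
--     for k in range(n): dp[1<<k][k] = 1
--     full = (1<<n)-1
--     for mask in range(1, 1<<n):
--         for v in range(n):
--             if not (mask & (1<<v)) or dp[mask][v]==0: continue
--             for u in range(n):
--                 if mask & (1<<u): continue
--                 if T[verts[v]][verts[u]]: dp[mask|(1<<u)][u] += dp[mask][v]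
--     return dp[full][ti]
-- ===== SOURCE B (Python) =====
-- def h_end_dp(T, verts, target):
--     n = len(verts)
--     if n == 1: return 1
--     idx = {v: k for k, v in enumerate(verts)}
--     ti = idx[target]
--     memo = {}
--     def f(mask, v):
--         # number of Hamiltonian paths covering exactly `mask` and ending at index v
--         if not ((mask >> v) & 1): return 0
--         if mask == (1 << v): return 1
--         key = (mask, v)
--         if key in memo: return memo[key]
--         rest = mask ^ (1 << v)
--         total = 0
--         for u in range(n):
--             if ((rest >> u) & 1) and T.get(verts[u], {}).get(verts[v], 0):
--                 total += f(rest, u)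
--         memo[key] = total
--         return total
--     return f((1 << n) - 1, ti)
-- ===== Notes on version B (the rewrite author's own statement) =====
-- stated objective: alternative
-- what changed: Replaces the bottom-up push DP over an explicit 2^n x n table (pushing each state's count to successors) by a top-down memoized recursion that pulls each state's count from its predecessors, recursing on subsets and caching (mask, v) in a dict; no table is allocated and only reachable states are evaluated.
import Mathlib
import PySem

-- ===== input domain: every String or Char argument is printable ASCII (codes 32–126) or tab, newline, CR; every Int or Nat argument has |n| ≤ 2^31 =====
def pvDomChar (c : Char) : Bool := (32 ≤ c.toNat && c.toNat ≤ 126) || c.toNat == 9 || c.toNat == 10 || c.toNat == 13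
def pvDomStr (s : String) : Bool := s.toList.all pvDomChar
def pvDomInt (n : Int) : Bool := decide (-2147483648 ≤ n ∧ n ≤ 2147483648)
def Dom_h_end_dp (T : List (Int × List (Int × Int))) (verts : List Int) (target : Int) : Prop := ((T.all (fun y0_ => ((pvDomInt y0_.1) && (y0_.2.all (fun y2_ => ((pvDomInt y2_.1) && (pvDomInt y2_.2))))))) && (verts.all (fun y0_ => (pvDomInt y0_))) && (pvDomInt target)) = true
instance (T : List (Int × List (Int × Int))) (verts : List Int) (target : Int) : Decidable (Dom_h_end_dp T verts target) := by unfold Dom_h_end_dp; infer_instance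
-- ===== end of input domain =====

-- B replaces A's bottom-up push DP over an explicit 2^n×n table by a top-down memoized
-- recursion pulling each state's count from its predecessors (alternative decomposition,
-- same exact return value).

-- ===== PORT A =====

-- shared cell access for A's list-of-lists table: dp[m][u] read / write (indices always in range in A)
def pvGet2 (dp : List (List Int)) (m u : Nat) : Int := (dp.getD m []).getD u 0
def pvSet2 (dp : List (List Int)) (m u : Nat) (x : Int) : List (List Int) :=
  dp.set m ((dp.getD m []).set u x)

-- A's edge test `T[verts[v]][verts[u]]` (dicts): exact wherever the keys are present,
-- which Pre_ guarantees for every pair A reaches; `.getD` defaults are never hit inside Pre_.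
def pvEdgeA (T : List (Int × List (Int × Int))) (verts : List Int) (a b : Nat) : Int :=
  PySem.Dict.getD (PySem.Dict.mk (((PySem.Dict.mk T).get? (verts.getD a 0)).getD []))
    (verts.getD b 0) 0

def h_end_dp (T : List (Int × List (Int × Int))) (verts : List Int) (target : Int) : Int :=
  let n := verts.length
  if n = 1 then 1 else
    -- idx = {v: k for k, v in enumerate(verts)}
    let idx := (PySem.List.enumerate verts).foldl
      (fun d kv => d.insert kv.2 kv.1) (PySem.Dict.mk ([] : List (Int × Int)))
    -- ti = idx[target]; exact inside Pre_ (target present; values are nonnegative indices)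
    let ti : Nat := ((idx.get? target).getD 0).toNat
    let dp := List.replicate (1 <<< n) (List.replicate n (0 : Int))
    let dp := (List.range n).foldl (fun dp k => pvSet2 dp (1 <<< k) k 1) dp
    let dp := (List.range' 1 (1 <<< n - 1)).foldl (fun dp mask =>
        (List.range n).foldl (fun dp v =>
          if mask.testBit v = false ∨ pvGet2 dp mask v = 0 then dp
          else (List.range n).foldl (fun dp u =>
            if mask.testBit u = true then dp
            else if pvEdgeA T verts v u ≠ 0 then
              pvSet2 dp (mask ||| (1 <<< u)) u
                (pvGet2 dp (mask ||| (1 <<< u)) u + pvGet2 dp mask v)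
            else dp) dp) dp) dp
    pvGet2 dp (1 <<< n - 1) ti

-- ===== PORT B =====

-- B's edge test `T.get(verts[a], {}).get(verts[b], 0)`: exact, total.
def pvEdge (T : List (Int × List (Int × Int))) (verts : List Int) (a b : Nat) : Int :=
  PySem.Dict.getD (PySem.Dict.mk ((PySem.Dict.mk T).getD (verts.getD a 0) []))
    (verts.getD b 0) 0

-- termination helper for pvF: clearing a set bit decreases the mask
theorem pvXorLt {m v : Nat} (h : m.testBit v = true) : m ^^^ 1 <<< v < m := by
  have h2 : (1 : Nat) <<< v = 2 ^ v := by simp [Nat.shiftLeft_eq]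
  rw [h2]
  refine Nat.lt_of_testBit v ?_ h ?_
  · simp [Nat.testBit_xor, h]
  · intro j hj
    simp [Nat.testBit_xor, Nat.ne_of_lt hj]

-- B's memoized f(mask, v) (memoization is a pure cache: ported as the recursion itself),
-- with the `for u in range(n)` accumulation as the explicit loop pvSumB.
mutual
def pvF (T : List (Int × List (Int × Int))) (verts : List Int) (n mask v : Nat) : Int :=
  if h : mask.testBit v = true then
    have _hbit := h
    if mask = 1 <<< v then 1
    else pvSumB T verts n (mask ^^^ 1 <<< v) v (List.range n) 0
  else 0
termination_by (mask, 0)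
decreasing_by exact Prod.Lex.left _ _ (pvXorLt h)
def pvSumB (T : List (Int × List (Int × Int))) (verts : List Int) (n rest v : Nat)
    (us : List Nat) (acc : Int) : Int :=
  match us with
  | [] => acc
  | u :: tl => pvSumB T verts n rest v tl
      (if rest.testBit u = true ∧ pvEdge T verts u v ≠ 0 then acc + pvF T verts n rest u else acc)
termination_by (rest, us.length + 1)
decreasing_by
  · exact Prod.Lex.right _ (by simp [List.length_cons])
  · exact Prod.Lex.right _ (by simp [List.length_cons])
end

def h_end_dp_alt (T : List (Int × List (Int × Int))) (verts : List Int) (target : Int) : Int :=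
  let n := verts.length
  if n = 1 then 1 else
    let idx := (PySem.List.enumerate verts).foldl
      (fun d kv => d.insert kv.2 kv.1) (PySem.Dict.mk ([] : List (Int × Int)))
    let ti : Nat := ((idx.get? target).getD 0).toNat
    pvF T verts n (1 <<< n - 1) ti

-- ===== PRECONDITION & SPEC =====
-- Pre_ is exactly where the Python A returns: a single vertex, or a nonempty vertex list whose
-- target occurs in it and whose every ordered pair of distinct positions has both dict lookups
-- T[verts[i]][verts[j]] present (A performs all of them, from the singleton dp states; a missing
-- key or missing target raises KeyError).
def Pre_h_end_dp (T : List (Int × List (Int × Int))) (verts : List Int) (target : Int) : Prop :=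
  verts.length = 1 ∨
  (verts ≠ [] ∧ target ∈ verts ∧
    ∀ i ∈ List.range verts.length, ∀ j ∈ List.range verts.length, i ≠ j →
      (((PySem.Dict.mk T).get? (verts.getD i 0)).bind
        (fun row => (PySem.Dict.mk row).get? (verts.getD j 0))).isSome = true)
instance (T : List (Int × List (Int × Int))) (verts : List Int) (target : Int) : Decidable (Pre_h_end_dp T verts target) := by unfold Pre_h_end_dp; infer_instance

def pvWitness_h_end_dp : (List (Int × List (Int × Int))) × List Int × Int :=
  ([(0, [(0, 0), (1, 1)]), (1, [(0, 1), (1, 0)])], [0, 1], 1)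

def Spec_h_end_dp (T : List (Int × List (Int × Int))) (verts : List Int) (target : Int) (out : Int) : Prop := out = h_end_dp_alt T verts target
instance (T : List (Int × List (Int × Int))) (verts : List Int) (target : Int) (out : Int) : Decidable (Spec_h_end_dp T verts target out) := by unfold Spec_h_end_dp; infer_instance

-- ===== CLAIM (what is proved, stated in full; the proofs are below) =====
def Claim_equal_h_end_dp : Prop := ∀ (T : List (Int × List (Int × Int))) (verts : List Int) (target : Int), Dom_h_end_dp T verts target → Pre_h_end_dp T verts target → Spec_h_end_dp T verts target (h_end_dp T verts target)

-- ===== LEMMAS AND PROOFS =====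

theorem pvShift (k : Nat) : (1 : Nat) <<< k = 2 ^ k := by simp [Nat.shiftLeft_eq]

theorem pvXorLtP {m v : Nat} (h : m.testBit v = true) : m ^^^ 2 ^ v < m := by
  have := pvXorLt h; rwa [pvShift] at this

theorem pvEdge_eq (T : List (Int × List (Int × Int))) (verts : List Int) (a b : Nat) :
    pvEdge T verts a b = pvEdgeA T verts a b := by
  unfold pvEdge pvEdgeA
  simp [PySem.Dict.getD_eq_get?_getD]

-- bit-fiddling facts
theorem pvOrXor {m u : Nat} (h : m.testBit u = false) : (m ||| 2 ^ u) ^^^ 2 ^ u = m := by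
  apply Nat.eq_of_testBit_eq
  intro j
  rcases eq_or_ne j u with hj | hj
  · simp [Nat.testBit_xor, Nat.testBit_or, hj, h]
  · simp [Nat.testBit_xor, Nat.testBit_or, Ne.symm hj]

theorem pvSlot {M u m : Nat} (hu : M.testBit u = true) (hx : M ^^^ 2 ^ u = m) :
    m.testBit u = false ∧ M = m ||| 2 ^ u := by
  subst hx
  constructor
  · simp [Nat.testBit_xor, hu]
  · apply Nat.eq_of_testBit_eq
    intro j
    rcases eq_or_ne j u with hj | hj
    · simp [Nat.testBit_xor, Nat.testBit_or, hj, hu]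
    · simp [Nat.testBit_xor, Nat.testBit_or, Ne.symm hj]

theorem pvOrBit (m u : Nat) : (m ||| 2 ^ u).testBit u = true := by
  simp [Nat.testBit_or]

theorem pvOrNe {m u : Nat} (hm : m ≠ 0) (h : m.testBit u = false) : m ||| 2 ^ u ≠ 2 ^ u := by
  intro he
  apply hm
  have := pvOrXor h
  rw [he, Nat.xor_self] at this
  omega

-- shape of the dp table
def pvShape (n : Nat) (dp : List (List Int)) : Prop :=
  dp.length = 2 ^ n ∧ ∀ i (h : i < dp.length), dp[i].length = n

theorem pvShape_pvSet2 {n : Nat} {dp : List (List Int)} (hs : pvShape n dp) (m u : Nat) (x : Int) :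
    pvShape n (pvSet2 dp m u x) := by
  obtain ⟨h1, h2⟩ := hs
  refine ⟨by simp [pvSet2, h1], ?_⟩
  intro i hi
  simp only [pvSet2, List.length_set] at hi ⊢
  rw [List.getElem_set]
  by_cases he : m = i
  · subst he
    rw [if_pos rfl, List.length_set]
    rw [List.getD_eq_getElem?_getD, List.getElem?_eq_getElem hi]
    exact h2 m hi
  · rw [if_neg he]
    exact h2 i hi

theorem pvGet2_pvSet2 {n : Nat} {dp : List (List Int)} (hs : pvShape n dp)
    {m u : Nat} (hm : m < 2 ^ n) (hu : u < n) (x : Int) (M U : Nat) :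
    pvGet2 (pvSet2 dp m u x) M U = if M = m ∧ U = u then x else pvGet2 dp M U := by
  obtain ⟨h1, h2⟩ := hs
  have hmlen : m < dp.length := by omega
  have hrowlen : (dp[m]?.getD []).length = n := by
    rw [List.getElem?_eq_getElem hmlen]
    exact h2 m hmlen
  unfold pvGet2 pvSet2
  simp only [List.getD_eq_getElem?_getD]
  rw [List.getElem?_set]
  by_cases hM : m = M
  · subst hM
    rw [if_pos rfl, if_pos hmlen, Option.getD_some, List.getElem?_set]
    by_cases hU : u = U
    · subst hU
      rw [if_pos rfl, if_pos (by omega), Option.getD_some]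
      simp
    · rw [if_neg hU]
      rw [if_neg (fun hc => hU (Eq.symm hc.2))]
  · rw [if_neg hM]
    rw [if_neg (fun hc => hM (Eq.symm hc.1))]

-- state description: dp holds `val` on every in-range cell, 0 outside
def pvSt (n : Nat) (val : Nat → Nat → Int) (dp : List (List Int)) : Prop :=
  pvShape n dp ∧ ∀ M u, pvGet2 dp M u = if M < 2 ^ n ∧ u < n then val M u else 0

theorem pvSt_congr {n : Nat} {val val' : Nat → Nat → Int} {dp : List (List Int)}
    (h : ∀ M u, M < 2 ^ n → u < n → val M u = val' M u) (hs : pvSt n val dp) :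
    pvSt n val' dp := by
  obtain ⟨h1, h2⟩ := hs
  refine ⟨h1, fun M u => ?_⟩
  rw [h2 M u]
  split
  · next hc => exact h M u hc.1 hc.2
  · rfl

-- generic foldl facts
theorem pvFoldl_acc (c : Nat → Prop) [DecidablePred c] (g : Nat → Int) :
    ∀ (l : List Nat) (a : Int),
      l.foldl (fun acc x => if c x then acc + g x else acc) a
        = a + l.foldl (fun acc x => if c x then acc + g x else acc) 0 := by
  intro l
  induction l with
  | nil => simp
  | cons x tl ih =>
    intro a
    simp only [List.foldl_cons]
    by_cases hc : c x
    · rw [if_pos hc, if_pos hc, ih (a + g x), ih (0 + g x)]; ring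
    · rw [if_neg hc, if_neg hc, ih a]

theorem pvGuard_drop (c : Nat → Prop) [DecidablePred c] (g : Nat → Int) :
    ∀ (l : List Nat) (a : Int),
      l.foldl (fun acc x => if c x ∧ g x ≠ 0 then acc + g x else acc) a
        = l.foldl (fun acc x => if c x then acc + g x else acc) a := by
  intro l
  induction l with
  | nil => simp
  | cons x tl ih =>
    intro a
    simp only [List.foldl_cons]
    by_cases hc : c x
    · by_cases hg : g x = 0
      · simp [hc, hg, ih]
      · simp [hc, hg, ih]
    · simp [hc, ih]

-- the partial inflow into cell (m ||| 2^u, u) after middle-loop iterations js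
def pvPart (T : List (Int × List (Int × Int))) (verts : List Int) (n m u : Nat)
    (js : List Nat) : Int :=
  js.foldl (fun a w =>
    if m.testBit w = true ∧ pvF T verts n m w ≠ 0 ∧ pvEdgeA T verts w u ≠ 0
    then a + pvF T verts n m w else a) 0

theorem pvPart_append (T : List (Int × List (Int × Int))) (verts : List Int) (n m u : Nat)
    (js : List Nat) (w : Nat) :
    pvPart T verts n m u (js ++ [w]) = pvPart T verts n m u js +
      (if m.testBit w = true ∧ pvF T verts n m w ≠ 0 ∧ pvEdgeA T verts w u ≠ 0
       then pvF T verts n m w else 0) := by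
  unfold pvPart
  rw [List.foldl_append, List.foldl_cons, List.foldl_nil,
    pvFoldl_acc (fun w => m.testBit w = true ∧ pvF T verts n m w ≠ 0 ∧ pvEdgeA T verts w u ≠ 0)
      (fun w => pvF T verts n m w)]
  split <;> simp

theorem pvSumB_eq_foldl (T : List (Int × List (Int × Int))) (verts : List Int)
    (n rest v : Nat) :
    ∀ (us : List Nat) (acc : Int),
      pvSumB T verts n rest v us acc
        = us.foldl (fun acc u =>
            if rest.testBit u = true ∧ pvEdge T verts u v ≠ 0
            then acc + pvF T verts n rest u else acc) acc := by
  intro us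
  induction us with
  | nil => intro acc; rw [pvSumB]; simp
  | cons u tl ih => intro acc; rw [pvSumB]; simp only [List.foldl_cons]; exact ih _

-- pvF on a singleton and on a general state
theorem pvF_singleton (T : List (Int × List (Int × Int))) (verts : List Int) (n v : Nat) :
    pvF T verts n (2 ^ v) v = 1 := by
  rw [pvF]
  simp [Nat.testBit_two_pow_self, pvShift]

theorem pvF_nonsingleton (T : List (Int × List (Int × Int))) (verts : List Int) (n : Nat)
    {m v : Nat} (hb : m.testBit v = true) (hns : m ≠ 2 ^ v) :
    pvF T verts n m v = (List.range n).foldl (fun acc u =>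
      if (m ^^^ 2 ^ v).testBit u = true ∧ pvEdgeA T verts u v ≠ 0
      then acc + pvF T verts n (m ^^^ 2 ^ v) u else acc) 0 := by
  rw [pvF]
  rw [dif_pos hb, if_neg (by rw [pvShift]; exact hns), pvSumB_eq_foldl]
  rw [pvShift]
  apply PySem.List.foldl_congr_mem
  intro acc u _
  rw [pvEdge_eq]

theorem pvF_of_not_bit (T : List (Int × List (Int × Int))) (verts : List Int) (n : Nat)
    {m v : Nat} (hb : m.testBit v = false) : pvF T verts n m v = 0 := by
  rw [pvF]; simp [hb]

-- the full inflow equals pvF of the target state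
theorem pvPart_full (T : List (Int × List (Int × Int))) (verts : List Int) (n : Nat)
    {m u : Nat} (hu : m.testBit u = false) (hm : m ≠ 0) :
    pvPart T verts n m u (List.range n) = pvF T verts n (m ||| 2 ^ u) u := by
  rw [pvF_nonsingleton T verts n (pvOrBit m u) (pvOrNe hm hu), pvOrXor hu]
  unfold pvPart
  rw [PySem.List.foldl_congr_mem (List.range n) _
    (fun a w => if (m.testBit w = true ∧ pvEdgeA T verts w u ≠ 0) ∧ pvF T verts n m w ≠ 0
                then a + pvF T verts n m w else a) 0
    (by
      intro a w _
      by_cases h1 : m.testBit w = true <;> by_cases h2 : pvEdgeA T verts w u ≠ 0 <;>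
        by_cases h3 : pvF T verts n m w ≠ 0 <;> simp [h1, h2, h3])]
  rw [pvGuard_drop (fun w => m.testBit w = true ∧ pvEdgeA T verts w u ≠ 0)
    (fun w => pvF T verts n m w) (List.range n) 0]

-- intermediate-state value functions
def pvDval (T : List (Int × List (Int × Int))) (verts : List Int) (n m : Nat) :
    Nat → Nat → Int := fun M u =>
  if M.testBit u = true ∧ M ^^^ 2 ^ u < m then pvF T verts n M u else 0

def pvMval (T : List (Int × List (Int × Int))) (verts : List Int) (n m : Nat)
    (js : List Nat) : Nat → Nat → Int := fun M u =>
  if M.testBit u = true then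
    (if M ^^^ 2 ^ u < m then pvF T verts n M u
     else if M ^^^ 2 ^ u = m then pvPart T verts n m u js else 0)
  else 0

def pvIval (T : List (Int × List (Int × Int))) (verts : List Int) (n m : Nat)
    (js : List Nat) (v i : Nat) : Nat → Nat → Int := fun M u =>
  if M.testBit u = true then
    (if M ^^^ 2 ^ u < m then pvF T verts n M u
     else if M ^^^ 2 ^ u = m then
       pvPart T verts n m u js +
         (if u < i ∧ pvEdgeA T verts v u ≠ 0 then pvF T verts n m v else 0)
     else 0)
  else 0

def pvInitVal (i : Nat) : Nat → Nat → Int := fun M u => if M = 2 ^ u ∧ u < i then 1 else 0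

-- the initial table
theorem pvSt_zero (n : Nat) :
    pvSt n (fun _ _ => 0) (List.replicate (2 ^ n) (List.replicate n (0 : Int))) := by
  constructor
  · constructor
    · simp
    · intro i h; simp
  · intro M u
    simp only [pvGet2, List.getD_eq_getElem?_getD, List.getElem?_replicate]
    by_cases h : M < 2 ^ n <;> simp [h]

-- init loop: dp[1<<k][k] = 1
theorem pvInitLoop (n : Nat) : ∀ (k i : Nat), i + k ≤ n → ∀ dp,
    pvSt n (pvInitVal i) dp →
    pvSt n (pvInitVal (i + k))
      ((List.range' i k).foldl (fun dp k' => pvSet2 dp (2 ^ k') k' 1) dp) := by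
  intro k
  induction k with
  | zero => intro i _ dp h; simpa using h
  | succ k ih =>
    intro i hik dp h
    rw [List.range'_succ, List.foldl_cons]
    have hi : i < n := by omega
    have h2i : 2 ^ i < 2 ^ n := Nat.pow_lt_pow_right (by omega) hi
    have hnext : pvSt n (pvInitVal (i + 1)) (pvSet2 dp (2 ^ i) i 1) := by
      obtain ⟨hs, hv⟩ := h
      constructor
      · exact pvShape_pvSet2 hs _ _ _
      · intro M u
        rw [pvGet2_pvSet2 hs h2i hi 1 M u]
        split
        · next he =>
          obtain ⟨he1, he2⟩ := he
          subst he1; subst he2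
          simp [h2i, hi, pvInitVal]
        · next hne =>
          rw [hv M u]
          split
          · next hc =>
            unfold pvInitVal
            split <;> split <;> try rfl
            · next ha hb =>
              exfalso; apply hb
              exact ⟨ha.1, by omega⟩
            · next ha hb =>
              obtain ⟨hb1, hb2⟩ := hb
              rcases Nat.lt_or_ge u i with hu | hu
              · exact absurd ⟨hb1, by omega⟩ ha
              · have : u = i := by omega
                subst this
                exact absurd ⟨hb1, rfl⟩ hne
          · rfl
    have := ih (i + 1) (by omega) _ hnext
    simpa [Nat.add_comm, Nat.add_assoc, Nat.add_left_comm] using this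

-- incrementing the inner counter does not change the state value except at the written cell
theorem pvIval_succ (T : List (Int × List (Int × Int))) (verts : List Int) (n m : Nat)
    (js : List Nat) (v i M u : Nat)
    (hc : m.testBit i = true ∨ pvEdgeA T verts v i = 0 ∨ ¬(M = m ||| 2 ^ i ∧ u = i)) :
    pvIval T verts n m js v (i + 1) M u = pvIval T verts n m js v i M u := by
  unfold pvIval
  by_cases hb : M.testBit u = true
  · rw [if_pos hb, if_pos hb]
    by_cases hlt : M ^^^ 2 ^ u < m
    · rw [if_pos hlt, if_pos hlt]
    · rw [if_neg hlt, if_neg hlt]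
      by_cases hx : M ^^^ 2 ^ u = m
      · rw [if_pos hx, if_pos hx]
        by_cases hui : u = i
        · subst hui
          obtain ⟨hmb, hM0⟩ := pvSlot hb hx
          rcases hc with hc | hc | hc
          · rw [hmb] at hc; exact absurd hc (by simp)
          · simp [hc]
          · exact absurd ⟨hM0, rfl⟩ hc
        · have he : (u < i + 1 ∧ pvEdgeA T verts v u ≠ 0) ↔ (u < i ∧ pvEdgeA T verts v u ≠ 0) := by
            constructor <;> rintro ⟨h1, h2⟩ <;> exact ⟨by omega, h2⟩
          rw [if_congr he rfl rfl]
      · rw [if_neg hx, if_neg hx]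
  · rw [if_neg hb, if_neg hb]

-- inner loop over u
theorem pvInner (T : List (Int × List (Int × Int))) (verts : List Int) (n m : Nat)
    (js : List Nat) (v : Nat) (hmlt : m < 2 ^ n)
    (hv : m.testBit v = true) (hvlt : v < n) :
    ∀ (k i : Nat), i + k ≤ n → ∀ dp,
      pvSt n (pvIval T verts n m js v i) dp →
      pvSt n (pvIval T verts n m js v (i + k))
        ((List.range' i k).foldl (fun dp u =>
          if m.testBit u = true then dp
          else if pvEdgeA T verts v u ≠ 0 then
            pvSet2 dp (m ||| 2 ^ u) u
              (pvGet2 dp (m ||| 2 ^ u) u + pvGet2 dp m v)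
          else dp) dp) := by
  intro k
  induction k with
  | zero => intro i _ dp h; simpa using h
  | succ k ih =>
    intro i hik dp h
    rw [List.range'_succ, List.foldl_cons]
    have hi : i < n := by omega
    have hstep : pvSt n (pvIval T verts n m js v (i + 1))
        (if m.testBit i = true then dp
         else if pvEdgeA T verts v i ≠ 0 then
           pvSet2 dp (m ||| 2 ^ i) i (pvGet2 dp (m ||| 2 ^ i) i + pvGet2 dp m v)
         else dp) := by
      by_cases hbi : m.testBit i = true
      · rw [if_pos hbi]
        exact pvSt_congr (fun M u _ _ => (pvIval_succ T verts n m js v i M u (Or.inl hbi)).symm) h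
      · rw [if_neg hbi]
        have hbi' : m.testBit i = false := by simpa using hbi
        by_cases hei : pvEdgeA T verts v i ≠ 0
        · rw [if_pos hei]
          obtain ⟨hs, hg⟩ := h
          have hM0lt : m ||| 2 ^ i < 2 ^ n :=
            Nat.or_lt_two_pow hmlt (Nat.pow_lt_pow_right (by omega) hi)
          have hxor : (m ||| 2 ^ i) ^^^ 2 ^ i = m := pvOrXor hbi'
          have e1 : pvGet2 dp (m ||| 2 ^ i) i = pvPart T verts n m i js := by
            rw [hg, if_pos ⟨hM0lt, hi⟩]
            simp [pvIval, hxor]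
          have e2 : pvGet2 dp m v = pvF T verts n m v := by
            rw [hg, if_pos ⟨hmlt, hvlt⟩]
            simp [pvIval, hv, pvXorLtP hv]
          constructor
          · exact pvShape_pvSet2 hs _ _ _
          · intro M U
            rw [pvGet2_pvSet2 hs hM0lt hi _ M U]
            by_cases hMU : M = m ||| 2 ^ i ∧ U = i
            · obtain ⟨hM, hU⟩ := hMU
              subst hM; subst hU
              rw [if_pos ⟨rfl, rfl⟩, if_pos ⟨hM0lt, hi⟩, e1, e2]
              simp [pvIval, hxor, hei]
            · rw [if_neg hMU, hg M U]
              by_cases hr : M < 2 ^ n ∧ U < n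
              · rw [if_pos hr, if_pos hr,
                  pvIval_succ T verts n m js v i M U (Or.inr (Or.inr hMU))]
              · rw [if_neg hr, if_neg hr]
        · rw [if_neg hei]
          have hez : pvEdgeA T verts v i = 0 := by
            by_contra hne
            exact hei hne
          exact pvSt_congr
            (fun M u _ _ => (pvIval_succ T verts n m js v i M u (Or.inr (Or.inl hez))).symm) h
    have := ih (i + 1) (by omega) _ hstep
    have harith : i + 1 + k = i + (k + 1) := by omega
    rwa [harith] at this

-- middle loop over v
theorem pvMid (T : List (Int × List (Int × Int))) (verts : List Int) (n m : Nat)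
    (hmlt : m < 2 ^ n) :
    ∀ (k j : Nat), j + k ≤ n → ∀ dp,
      pvSt n (pvMval T verts n m (List.range j)) dp →
      pvSt n (pvMval T verts n m (List.range (j + k)))
        ((List.range' j k).foldl (fun dp v =>
          if m.testBit v = false ∨ pvGet2 dp m v = 0 then dp
          else (List.range n).foldl (fun dp u =>
            if m.testBit u = true then dp
            else if pvEdgeA T verts v u ≠ 0 then
              pvSet2 dp (m ||| 2 ^ u) u
                (pvGet2 dp (m ||| 2 ^ u) u + pvGet2 dp m v)
            else dp) dp) dp) := by
  intro k
  induction k with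
  | zero => intro j _ dp h; simpa using h
  | succ k ih =>
    intro j hjk dp h
    rw [List.range'_succ, List.foldl_cons]
    have hj : j < n := by omega
    have hstep : pvSt n (pvMval T verts n m (List.range (j + 1)))
        (if m.testBit j = false ∨ pvGet2 dp m j = 0 then dp
         else (List.range n).foldl (fun dp u =>
            if m.testBit u = true then dp
            else if pvEdgeA T verts j u ≠ 0 then
              pvSet2 dp (m ||| 2 ^ u) u
                (pvGet2 dp (m ||| 2 ^ u) u + pvGet2 dp m j)
            else dp) dp) := by
      have hgmj : pvGet2 dp m j = if m.testBit j = true then pvF T verts n m j else 0 := by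
        rw [h.2 m j, if_pos ⟨hmlt, hj⟩]
        unfold pvMval
        by_cases hb : m.testBit j = true
        · simp [hb, pvXorLtP hb]
        · simp [hb]
      by_cases hbj : m.testBit j = true
      · by_cases hfj : pvF T verts n m j = 0
        · rw [if_pos (Or.inr (by rw [hgmj, if_pos hbj]; exact hfj))]
          refine pvSt_congr (fun M u _ _ => ?_) h
          have hpart : pvPart T verts n m u (List.range (j + 1))
              = pvPart T verts n m u (List.range j) := by
            rw [List.range_succ, pvPart_append]
            simp [hfj]
          unfold pvMval
          rw [hpart]
        · rw [if_neg (fun hor => hor.elim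
            (fun hf => by rw [hbj] at hf; cases hf)
            (fun hz => hfj (by rw [hgmj, if_pos hbj] at hz; exact hz)))]
          have hstart : pvSt n (pvIval T verts n m (List.range j) j 0) dp := by
            refine pvSt_congr (fun M u _ _ => ?_) h
            simp [pvMval, pvIval]
          have hend := pvInner T verts n m (List.range j) j hmlt hbj hj n 0 (by omega) dp hstart
          rw [← List.range_eq_range'] at hend
          rw [Nat.zero_add] at hend
          refine pvSt_congr (fun M u _ hur => ?_) hend
          · have hpart : pvPart T verts n m u (List.range (j + 1))
                = pvPart T verts n m u (List.range j)
                  + (if pvEdgeA T verts j u ≠ 0 then pvF T verts n m j else 0) := by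
              rw [List.range_succ, pvPart_append]
              by_cases he : pvEdgeA T verts j u ≠ 0 <;> simp [hbj, hfj, he]
            unfold pvIval pvMval
            rw [hpart]
            by_cases hb : M.testBit u = true
            · by_cases hlt : M ^^^ 2 ^ u < m
              · simp [hb, hlt]
              · by_cases hx : M ^^^ 2 ^ u = m
                · simp only [hb, if_true, if_neg hlt, if_pos hx]
                  have : (u < n ∧ pvEdgeA T verts j u ≠ 0) ↔ (pvEdgeA T verts j u ≠ 0) := by
                    constructor
                    · rintro ⟨_, h2⟩; exact h2
                    · intro h2; exact ⟨by omega, h2⟩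
                  rw [if_congr this rfl rfl]
                · simp [hb, hlt, hx]
            · simp [hb]
      · rw [if_pos (Or.inl (by simpa using hbj))]
        refine pvSt_congr (fun M u _ _ => ?_) h
        have hpart : pvPart T verts n m u (List.range (j + 1))
            = pvPart T verts n m u (List.range j) := by
          rw [List.range_succ, pvPart_append]
          simp [hbj]
        unfold pvMval
        rw [hpart]
    have := ih (j + 1) (by omega) _ hstep
    have harith : j + 1 + k = j + (k + 1) := by omega
    rwa [harith] at this

-- outer loop over mask
theorem pvOuter (T : List (Int × List (Int × Int))) (verts : List Int) (n : Nat) :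
    ∀ (k m : Nat), 1 ≤ m → m + k ≤ 2 ^ n → ∀ dp,
      pvSt n (pvDval T verts n m) dp →
      pvSt n (pvDval T verts n (m + k))
        ((List.range' m k).foldl (fun dp mask =>
          (List.range n).foldl (fun dp v =>
            if mask.testBit v = false ∨ pvGet2 dp mask v = 0 then dp
            else (List.range n).foldl (fun dp u =>
              if mask.testBit u = true then dp
              else if pvEdgeA T verts v u ≠ 0 then
                pvSet2 dp (mask ||| 2 ^ u) u
                  (pvGet2 dp (mask ||| 2 ^ u) u + pvGet2 dp mask v)
              else dp) dp) dp) dp) := by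
  intro k
  induction k with
  | zero => intro m _ _ dp h; simpa using h
  | succ k ih =>
    intro m hm1 hmk dp h
    rw [List.range'_succ, List.foldl_cons]
    have hmlt : m < 2 ^ n := by omega
    have hstep : pvSt n (pvDval T verts n (m + 1))
        ((List.range n).foldl (fun dp v =>
            if m.testBit v = false ∨ pvGet2 dp m v = 0 then dp
            else (List.range n).foldl (fun dp u =>
              if m.testBit u = true then dp
              else if pvEdgeA T verts v u ≠ 0 then
                pvSet2 dp (m ||| 2 ^ u) u
                  (pvGet2 dp (m ||| 2 ^ u) u + pvGet2 dp m v)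
              else dp) dp) dp) := by
      have hstart : pvSt n (pvMval T verts n m (List.range 0)) dp := by
        refine pvSt_congr (fun M u _ _ => ?_) h
        unfold pvDval pvMval
        by_cases hb : M.testBit u = true
        · by_cases hlt : M ^^^ 2 ^ u < m
          · simp [hb, hlt]
          · by_cases hx : M ^^^ 2 ^ u = m <;> simp [hb, hlt, hx, pvPart]
        · simp [hb]
      have hend := pvMid T verts n m hmlt n 0 (by omega) dp hstart
      rw [← List.range_eq_range'] at hend
      rw [Nat.zero_add] at hend
      refine pvSt_congr (fun M u hMr hur => ?_) hend
      unfold pvMval pvDval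
      by_cases hb : M.testBit u = true
      · by_cases hlt : M ^^^ 2 ^ u < m
        · simp [hb, hlt, Nat.lt_succ_of_lt hlt]
        · by_cases hx : M ^^^ 2 ^ u = m
          · obtain ⟨hmb, hM0⟩ := pvSlot hb hx
            rw [if_pos hb, if_neg hlt, if_pos hx, if_pos ⟨hb, by omega⟩]
            rw [pvPart_full T verts n hmb (by omega), ← hM0]
          · have : ¬ (M ^^^ 2 ^ u < m + 1) := by omega
            simp [hb, hlt, hx, this]
      · simp [hb]
    have := ih (m + 1) (by omega) (by omega) _ hstep
    have harith : m + 1 + k = m + (k + 1) := by omega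
    rwa [harith] at this

-- the whole pipeline computes pvF at any cell of the final table
theorem pvMain (T : List (Int × List (Int × Int))) (verts : List Int) (n ti : Nat) :
    pvGet2
      ((List.range' 1 (1 <<< n - 1)).foldl (fun dp mask =>
        (List.range n).foldl (fun dp v =>
          if mask.testBit v = false ∨ pvGet2 dp mask v = 0 then dp
          else (List.range n).foldl (fun dp u =>
            if mask.testBit u = true then dp
            else if pvEdgeA T verts v u ≠ 0 then
              pvSet2 dp (mask ||| (1 <<< u)) u
                (pvGet2 dp (mask ||| (1 <<< u)) u + pvGet2 dp mask v)
            else dp) dp) dp)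
        ((List.range n).foldl (fun dp k => pvSet2 dp (1 <<< k) k 1)
          (List.replicate (1 <<< n) (List.replicate n (0 : Int)))))
      (1 <<< n - 1) ti
    = pvF T verts n (1 <<< n - 1) ti := by
  simp only [pvShift]
  have hpow : 1 ≤ 2 ^ n := Nat.one_le_two_pow
  have h0 : pvSt n (pvInitVal 0) (List.replicate (2 ^ n) (List.replicate n (0 : Int))) := by
    refine pvSt_congr (fun M u _ _ => ?_) (pvSt_zero n)
    simp [pvInitVal]
  have h1 : pvSt n (pvInitVal n)
      ((List.range n).foldl (fun dp k => pvSet2 dp (2 ^ k) k 1)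
        (List.replicate (2 ^ n) (List.replicate n (0 : Int)))) := by
    rw [List.range_eq_range']
    simpa using pvInitLoop n n 0 (by omega) _ h0
  have h2 : pvSt n (pvDval T verts n 1)
      ((List.range n).foldl (fun dp k => pvSet2 dp (2 ^ k) k 1)
        (List.replicate (2 ^ n) (List.replicate n (0 : Int)))) := by
    refine pvSt_congr (fun M u _ hur => ?_) h1
    unfold pvInitVal pvDval
    by_cases hMe : M = 2 ^ u
    · subst hMe
      simp [Nat.testBit_two_pow_self, Nat.xor_self, hur, pvF_singleton]
    · rw [if_neg (by simp [hMe])]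
      by_cases hb : M.testBit u = true
      · have : M ^^^ 2 ^ u ≠ 0 := by
          intro hz
          exact hMe (by simpa using Nat.xor_eq_zero_iff.mp hz)
        have : ¬ (M ^^^ 2 ^ u < 1) := by omega
        simp [hb, this]
      · simp [hb]
  have h3 := pvOuter T verts n (2 ^ n - 1) 1 (by omega) (by omega) _ h2
  have harith : 1 + (2 ^ n - 1) = 2 ^ n := by omega
  rw [harith] at h3
  obtain ⟨_, hg⟩ := h3
  rw [hg]
  by_cases hti : ti < n
  · have hfull : 2 ^ n - 1 < 2 ^ n := by omega
    rw [if_pos ⟨hfull, hti⟩]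
    unfold pvDval
    rw [if_pos ⟨by simp [Nat.testBit_two_pow_sub_one, hti],
      Nat.xor_lt_two_pow hfull (Nat.pow_lt_pow_right (by omega) hti)⟩]
  · rw [if_neg (by omega)]
    rw [pvF_of_not_bit T verts n (by simp [Nat.testBit_two_pow_sub_one]; omega)]

-- ===== VERDICT (by name: the statement is the Claim_ definition above) =====
theorem h_end_dp_spec : Claim_equal_h_end_dp := by
  intro T verts target _ _
  unfold Spec_h_end_dp h_end_dp h_end_dp_alt
  by_cases h1 : verts.length = 1
  · simp [h1]
  · simp only [h1, if_false]
    exact pvMain T verts verts.length _
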